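-- pv_equiv track=rewrite | github.com/jm-willy/common_motif_discovery | utils.py | isProtein
-- ===== SOURCE A (Python) =====
-- alphabetDNA = ["-", "A", "C", "G", "T"]
--
-- alphabetProtein = [
--     "-",
--     "A",
--     "R",
--     "N",
--     "D",
--     "C",
--     "E",
--     "Q",
--     "G",
--     "H",
--     "I",
--     "L",
--     "K",
--     "M",
--     "F",
--     "P",
--     "S",
--     "T",
--     "W",
--     "Y",
--     "V",
-- ]
--
-- def isProtein(sequence: str) -> bool:
--     """
--     Will fail to tell apart proteins whose
--     only amino acids are "A", "C", "G", "T"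
--     """
--     if "U" in sequence:
--         return False
--
--     unique = tuple(set(alphabetProtein) - set(alphabetDNA))
--     for i in unique:
--         if i in sequence:
--             return True
--     return False
-- ===== SOURCE B (Python) =====
-- alphabetDNA = ["-", "A", "C", "G", "T"]
--
-- alphabetProtein = [
--     "-", "A", "R", "N", "D", "C", "E", "Q", "G", "H", "I",
--     "L", "K", "M", "F", "P", "S", "T", "W", "Y", "V",
-- ]
--
--
-- def isProtein(sequence: str) -> bool:
--     if "U" in sequence:
--         return False
--     protein_only = set(alphabetProtein) - set(alphabetDNA)
--     return any(c in protein_only for c in sequence)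
-- ===== Notes on version B (the rewrite author's own statement) =====
-- stated objective: idiomatic
-- what changed: Instead of looping over the protein-only alphabet and substring-scanning the sequence for each letter, B builds the protein-only set once and makes a single pass over the sequence's characters, returning True on the first character found in the set.
import Mathlib
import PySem

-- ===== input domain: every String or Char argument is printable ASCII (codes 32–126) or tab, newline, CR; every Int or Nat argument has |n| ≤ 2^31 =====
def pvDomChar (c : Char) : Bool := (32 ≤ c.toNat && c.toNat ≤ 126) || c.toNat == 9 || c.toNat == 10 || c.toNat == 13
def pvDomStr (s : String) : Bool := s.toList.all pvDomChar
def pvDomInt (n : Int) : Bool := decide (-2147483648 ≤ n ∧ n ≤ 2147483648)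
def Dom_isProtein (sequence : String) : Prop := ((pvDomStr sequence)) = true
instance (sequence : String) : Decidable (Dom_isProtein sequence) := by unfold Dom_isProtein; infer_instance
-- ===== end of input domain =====

-- B replaces A's loop over the protein-only alphabet (one substring scan of the
-- sequence per letter) by one pass over the sequence's characters against the
-- protein-only set, built once (objective: idiomatic single pass).

-- ===== PORT A =====
def alphabetDNA : List String := ["-", "A", "C", "G", "T"]

def alphabetProtein : List String :=
  ["-", "A", "R", "N", "D", "C", "E", "Q", "G", "H", "I",
   "L", "K", "M", "F", "P", "S", "T", "W", "Y", "V"]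

-- 'for i in unique: if i in sequence: return True' (result is order-independent: any-hit)
def isProteinLoop (unique : List String) (sequence : String) : Bool :=
  match unique with
  | [] => false
  | i :: rest => if PySem.Str.isIn i sequence then true else isProteinLoop rest sequence

def isProtein (sequence : String) : Bool :=
  if PySem.Str.isIn "U" sequence then false
  else
    let unique := PySem.Set.diff (PySem.Set.ofList alphabetProtein) (PySem.Set.ofList alphabetDNA)
    isProteinLoop unique sequence

-- ===== PORT B =====
def isProtein_alt (sequence : String) : Bool :=
  if PySem.Str.isIn "U" sequence then false
  else
    let proteinOnly := PySem.Set.diff (PySem.Set.ofList alphabetProtein) (PySem.Set.ofList alphabetDNA)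
    sequence.toList.any (fun c => PySem.Set.contains proteinOnly (String.ofList [c]))

-- ===== PRECONDITION & SPEC =====
def Spec_isProtein (sequence : String) (out : Bool) : Prop := out = isProtein_alt sequence
instance (sequence : String) (out : Bool) : Decidable (Spec_isProtein sequence out) := by unfold Spec_isProtein; infer_instance

-- ===== CLAIM (what is proved, stated in full; the proofs are below) =====
def Claim_equal_isProtein : Prop := ∀ (sequence : String), Dom_isProtein sequence → Spec_isProtein sequence (isProtein sequence)

-- ===== LEMMAS AND PROOFS =====

-- the protein-only characters, in order
def pvProteinChars : List Char :=
  ['R', 'N', 'D', 'E', 'Q', 'H', 'I', 'L', 'K', 'M', 'F', 'P', 'S', 'W', 'Y', 'V']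

theorem pvDiff_eq :
    PySem.Set.diff (PySem.Set.ofList alphabetProtein) (PySem.Set.ofList alphabetDNA)
      = pvProteinChars.map (fun c => String.ofList [c]) := by decide

theorem pvLoop_any (us : List String) (s : String) :
    isProteinLoop us s = us.any (fun x => PySem.Str.isIn x s) := by
  induction us with
  | nil => rfl
  | cons i rest ih => simp [isProteinLoop, ih]

theorem pvSingleton_infix (c : Char) (l : List Char) : [c] <:+: l ↔ c ∈ l := by
  constructor
  · intro h
    exact (List.singleton_sublist).mp h.sublist
  · intro h
    obtain ⟨l₁, l₂, rfl⟩ := List.append_of_mem h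
    exact ⟨l₁, l₂, by simp⟩

theorem pvSingleton_isIn (c : Char) (s : String) :
    PySem.Str.isIn (String.ofList [c]) s = s.toList.contains c := by
  rw [Bool.eq_iff_iff, PySem.Str.isIn_iff_infix]
  simp [pvSingleton_infix, List.contains_iff_mem]

theorem pvMap_contains (cs : List Char) (c : Char) :
    (cs.map (fun c => String.ofList [c])).contains (String.ofList [c]) = cs.contains c := by
  rw [Bool.eq_iff_iff]
  simp only [List.contains_iff_mem, List.mem_map]
  constructor
  · rintro ⟨a, ha, he⟩
    have : a = c := by simpa using congrArg String.toList he
    exact this ▸ ha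
  · intro h
    exact ⟨c, h, rfl⟩

theorem pvSwap (cs l : List Char) :
    cs.any (fun c => l.contains c) = l.any (fun c => cs.contains c) := by
  rw [Bool.eq_iff_iff]
  simp only [List.any_eq_true, List.contains_iff_mem]
  tauto

-- ===== VERDICT (by name: the statement is the Claim_ definition above) =====
theorem isProtein_spec : Claim_equal_isProtein := by
  intro s _
  unfold Spec_isProtein isProtein isProtein_alt
  cases h : PySem.Str.isIn "U" s
  · simp only [h, Bool.false_eq_true, if_false, pvDiff_eq, pvLoop_any, List.any_map]
    have h1 : ((fun x => PySem.Str.isIn x s) ∘ fun c => String.ofList [c])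
        = fun c => s.toList.contains c := funext fun c => pvSingleton_isIn c s
    have h2 : (fun c => PySem.Set.contains (pvProteinChars.map fun c => String.ofList [c]) (String.ofList [c]))
        = fun c => pvProteinChars.contains c := funext fun c => by
      simp only [PySem.Set.contains_eq_listContains]
      exact pvMap_contains _ c
    rw [h1, h2, pvSwap]
  · simp [h]
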